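-- pv_equiv track=rewrite | github.com/embydextrous/Interview | dp/gfg/69-countPathsWithAtMostKTurn.py | countPathsUtil
-- ===== SOURCE A (Python) =====
-- def countPathsUtil(x, y, k, d, dp):
--     if x < 0 or y < 0 or k < 0:
--         return 0
--     if x == 0 and y == 0:
--         return 1
--     if k == 0:
--         if d == 0 and x == 0:
--             return 1
--         if d == 1 and y == 0:
--             return 1
--         return 0
--     if dp[x][y][k][d] != -1:
--         return dp[x][y][k][d]
--     if d == 0:
--         dp[x][y][k][d] = countPathsUtil(x, y - 1, k, d, dp) + countPathsUtil(x - 1, y, k - 1, abs(d-1), dp)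
--     else:
--         dp[x][y][k][d] = countPathsUtil(x, y - 1, k - 1, abs(d-1), dp) + countPathsUtil(x - 1, y, k, d, dp)
--     return dp[x][y][k][d]
-- ===== SOURCE B (Python) =====
-- def countPathsUtil(x, y, k, d, dp):
--     if x < 0 or y < 0 or k < 0:
--         return 0
--     if x == 0 and y == 0:
--         return 1
--     if k == 0:
--         return 1 if (d == 0 and x == 0) or (d == 1 and y == 0) else 0
--     cells = [(i, j, l, m)
--              for i in range(x + 1)
--              for j in range(y + 1)
--              for l in range(k + 1)
--              for m in (0, 1)]
--     t = {}
--     for (i, j, l, m) in cells: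
--         if i == 0 and j == 0:
--             v = 1
--         elif l == 0:
--             v = 1 if (m == 0 and i == 0) or (m == 1 and j == 0) else 0
--         elif dp[i][j][l][m] != -1:
--             v = dp[i][j][l][m]
--         elif m == 0:
--             v = (t[(i, j - 1, l, 0)] if j > 0 else 0) + (t[(i - 1, j, l - 1, 1)] if i > 0 else 0)
--         else:
--             v = (t[(i, j - 1, l - 1, 0)] if j > 0 else 0) + (t[(i - 1, j, l, 1)] if i > 0 else 0)
--         t[(i, j, l, m)] = v
--     return t[(x, y, k, d)]
-- ===== Notes on version B (the rewrite author's own statement) =====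
-- stated objective: alternative
-- what changed: Replaces the top-down memoized recursion that mutates dp in place with a bottom-up iterative DP that fills a fresh table over all cells (i,j,l,m) in lexicographic order, reading dp only as a read-only cache; the return value is the table entry at (x,y,k,d).
-- outside the precondition, e.g. on countPathsUtil(1, 1, 1, 0, [[], [[], [[0, 0], [5, 5]]]]): A returns 5, B raises IndexError; on countPathsUtil(1, 0, 1, -1, [[[[0, 0], [0, 7]]], [[[0, 0], [0, 7]]]]): A returns 7, B raises KeyError
import Mathlib
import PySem

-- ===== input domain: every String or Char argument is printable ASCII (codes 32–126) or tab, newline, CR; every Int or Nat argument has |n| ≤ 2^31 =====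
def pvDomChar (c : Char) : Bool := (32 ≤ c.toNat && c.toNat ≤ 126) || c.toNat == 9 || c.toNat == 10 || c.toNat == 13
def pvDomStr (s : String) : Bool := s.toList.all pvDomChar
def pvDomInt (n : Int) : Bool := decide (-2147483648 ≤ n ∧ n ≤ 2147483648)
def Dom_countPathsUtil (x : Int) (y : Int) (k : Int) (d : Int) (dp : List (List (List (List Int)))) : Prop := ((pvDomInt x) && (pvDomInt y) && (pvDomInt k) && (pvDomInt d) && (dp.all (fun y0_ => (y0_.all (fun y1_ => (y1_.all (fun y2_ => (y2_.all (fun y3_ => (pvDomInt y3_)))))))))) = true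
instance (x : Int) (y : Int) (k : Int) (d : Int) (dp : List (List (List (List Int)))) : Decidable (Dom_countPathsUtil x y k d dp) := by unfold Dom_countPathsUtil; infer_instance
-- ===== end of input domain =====

-- B rewrites A's top-down memoized recursion (which mutates dp in place) as a bottom-up
-- iterative DP over a fresh table, reading dp only as a read-only cache; the equivalence
-- proved is about the RETURN value only (A mutates dp, B does not).

-- ===== PORT A =====
-- dp[x][y][k][d]  (chained Python indexing; none = IndexError at the first bad level)
def read4 (dp : List (List (List (List Int)))) (x y k d : Int) : Option Int :=
  (PySem.List.pyGet? dp x).bind fun r =>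
    (PySem.List.pyGet? r y).bind fun c =>
      (PySem.List.pyGet? c k).bind fun e =>
        PySem.List.pyGet? e d

-- dp[x][y][k][d] = v  (in-range under Pre_; pySetD's no-op default is never hit there)
def write4 (dp : List (List (List (List Int)))) (x y k d : Int) (v : Int) :
    List (List (List (List Int))) :=
  match PySem.List.pyGet? dp x with
  | none => dp
  | some r =>
    match PySem.List.pyGet? r y with
    | none => dp
    | some c =>
      match PySem.List.pyGet? c k with
      | none => dp
      | some e =>
        PySem.List.pySetD dp x
          (PySem.List.pySetD r y
            (PySem.List.pySetD c k (PySem.List.pySetD e d v)))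

-- literal transliteration of A's recursion; the Nat fuel is totality scaffolding only
-- (x.toNat + y.toNat + 1 always suffices: each recursive call lowers x + y)
def goA : Nat → Int → Int → Int → Int → List (List (List (List Int))) →
    Int × List (List (List (List Int)))
  | 0, x, y, k, d, dp =>
    if x < 0 ∨ y < 0 ∨ k < 0 then (0, dp)
    else if x = 0 ∧ y = 0 then (1, dp)
    else if k = 0 then
      (if d = 0 ∧ x = 0 then 1 else if d = 1 ∧ y = 0 then 1 else 0, dp)
    else (0, dp)  -- fuel exhausted: unreachable from countPathsUtil's initial fuel
  | f + 1, x, y, k, d, dp =>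
    if x < 0 ∨ y < 0 ∨ k < 0 then (0, dp)
    else if x = 0 ∧ y = 0 then (1, dp)
    else if k = 0 then
      (if d = 0 ∧ x = 0 then 1 else if d = 1 ∧ y = 0 then 1 else 0, dp)
    else
      match read4 dp x y k d with
      | none => (0, dp)  -- IndexError in Python: outside Pre_
      | some v =>
        if v ≠ -1 then (v, dp)
        else if d = 0 then
          let p := goA f x (y - 1) k d dp
          let q := goA f (x - 1) y (k - 1) (|d - 1|) p.2
          let dp2 := write4 q.2 x y k d (p.1 + q.1)
          ((read4 dp2 x y k d).getD 0, dp2)  -- Python re-reads dp[x][y][k][d]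
        else
          let p := goA f x (y - 1) (k - 1) (|d - 1|) dp
          let q := goA f (x - 1) y k d p.2
          let dp2 := write4 q.2 x y k d (p.1 + q.1)
          ((read4 dp2 x y k d).getD 0, dp2)

def countPathsUtil (x : Int) (y : Int) (k : Int) (d : Int)
    (dp : List (List (List (List Int)))) : Int :=
  (goA (x.toNat + y.toNat + 1) x y k d dp).1

-- ===== PORT B =====
-- one table cell of Source B's bottom-up fill
def cellB (dp : List (List (List (List Int))))
    (t : PySem.Dict (Int × Int × Int × Int) Int) (i j l m : Int) : Int :=
  if i = 0 ∧ j = 0 then 1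
  else if l = 0 then (if (m = 0 ∧ i = 0) ∨ (m = 1 ∧ j = 0) then 1 else 0)
  else
    match read4 dp i j l m with
    | none => 0  -- IndexError in Python: outside Pre_
    | some c =>
      if c ≠ -1 then c
      else if m = 0 then
        (if 0 < j then (t.get? (i, j - 1, l, 0)).getD 0 else 0) +
        (if 0 < i then (t.get? (i - 1, j, l - 1, 1)).getD 0 else 0)
      else
        (if 0 < j then (t.get? (i, j - 1, l - 1, 0)).getD 0 else 0) +
        (if 0 < i then (t.get? (i - 1, j, l, 1)).getD 0 else 0)

-- the comprehension: all cells (i, j, l, m) in lexicographic order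
def cellsB (x y k : Int) : List (Int × Int × Int × Int) :=
  (PySem.List.pyRange 0 (x + 1) 1).flatMap fun i =>
    (PySem.List.pyRange 0 (y + 1) 1).flatMap fun j =>
      (PySem.List.pyRange 0 (k + 1) 1).flatMap fun l =>
        [(i, j, l, 0), (i, j, l, 1)]

def countPathsUtil_alt (x : Int) (y : Int) (k : Int) (d : Int)
    (dp : List (List (List (List Int)))) : Int :=
  if x < 0 ∨ y < 0 ∨ k < 0 then 0
  else if x = 0 ∧ y = 0 then 1
  else if k = 0 then (if (d = 0 ∧ x = 0) ∨ (d = 1 ∧ y = 0) then 1 else 0)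
  else
    let t := (cellsB x y k).foldl
      (fun t c => t.insert c (cellB dp t c.1 c.2.1 c.2.2.1 c.2.2.2)) PySem.Dict.empty
    (t.get? (x, y, k, d)).getD 0  -- key present under Pre_; KeyError in Python otherwise

-- ===== PRECONDITION & SPEC =====
-- Pre_'s own copy of 4-level indexing (kept separate from the ports' helper)
def pvShapeGet (dp : List (List (List (List Int)))) (x y k d : Int) : Option Int :=
  (PySem.List.pyGet? dp x).bind fun r =>
    (PySem.List.pyGet? r y).bind fun c =>
      (PySem.List.pyGet? c k).bind fun e =>
        PySem.List.pyGet? e d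

-- Pre_ excludes (i) inputs where A raises IndexError on a missing dp cell, (ii) ragged dp on
-- which A happens to return only via a cached hit before reaching a missing cell, and
-- (iii) d outside {0,1} in the recursive case, where A's returning at all rests on Python's
-- accidental negative-index wraparound / an accidentally long innermost list.
def Pre_countPathsUtil (x : Int) (y : Int) (k : Int) (d : Int)
    (dp : List (List (List (List Int)))) : Prop :=
  (x < 0 ∨ y < 0 ∨ k < 0 ∨ (x = 0 ∧ y = 0) ∨ k = 0) ∨
  ((d = 0 ∨ d = 1) ∧
    ((PySem.List.pyRange 0 (x + 1) 1).all fun i =>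
      (PySem.List.pyRange 0 (y + 1) 1).all fun j =>
        (PySem.List.pyRange 0 (k + 1) 1).all fun l =>
          (pvShapeGet dp i j l 0).isSome && (pvShapeGet dp i j l 1).isSome) = true)

instance (x : Int) (y : Int) (k : Int) (d : Int) (dp : List (List (List (List Int)))) :
    Decidable (Pre_countPathsUtil x y k d dp) := by unfold Pre_countPathsUtil; infer_instance

def pvWitness_countPathsUtil : Int × Int × Int × Int × List (List (List (List Int))) :=
  (1, 1, 1, 0,
   [[[[-1, -1], [-1, -1]], [[-1, -1], [-1, -1]]],
    [[[-1, -1], [-1, -1]], [[-1, -1], [-1, -1]]]])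

def Spec_countPathsUtil (x : Int) (y : Int) (k : Int) (d : Int)
    (dp : List (List (List (List Int)))) (out : Int) : Prop :=
  out = countPathsUtil_alt x y k d dp

instance (x : Int) (y : Int) (k : Int) (d : Int) (dp : List (List (List (List Int))))
    (out : Int) : Decidable (Spec_countPathsUtil x y k d dp out) := by
  unfold Spec_countPathsUtil; infer_instance

-- ===== CLAIM (what is proved, stated in full; the proofs are below) =====
def Claim_equal_countPathsUtil : Prop :=
  ∀ (x : Int) (y : Int) (k : Int) (d : Int) (dp : List (List (List (List Int)))),
    Dom_countPathsUtil x y k d dp → Pre_countPathsUtil x y k d dp →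
      Spec_countPathsUtil x y k d dp (countPathsUtil x y k d dp)

-- ===== LEMMAS AND PROOFS =====

-- the common pure value: A's memoized recursion and B's table both compute G,
-- the recursion that treats the INITIAL dp as a read-only cache
def G : Nat → Int → Int → Int → Int → List (List (List (List Int))) → Int
  | 0, x, y, k, d, _ =>
    if x < 0 ∨ y < 0 ∨ k < 0 then 0
    else if x = 0 ∧ y = 0 then 1
    else if k = 0 then (if d = 0 ∧ x = 0 then 1 else if d = 1 ∧ y = 0 then 1 else 0)
    else 0
  | f + 1, x, y, k, d, dp =>
    if x < 0 ∨ y < 0 ∨ k < 0 then 0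
    else if x = 0 ∧ y = 0 then 1
    else if k = 0 then (if d = 0 ∧ x = 0 then 1 else if d = 1 ∧ y = 0 then 1 else 0)
    else
      match read4 dp x y k d with
      | none => 0
      | some v =>
        if v ≠ -1 then v
        else if d = 0 then
          G f x (y - 1) k d dp + G f (x - 1) y (k - 1) (|d - 1|) dp
        else
          G f x (y - 1) (k - 1) (|d - 1|) dp + G f (x - 1) y k d dp

def Ghat (dp : List (List (List (List Int)))) (x y k d : Int) : Int :=
  G (x.toNat + y.toNat) x y k d dp

lemma G_guard (f : Nat) (x y k d : Int) (dp : List (List (List (List Int))))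
    (h : x < 0 ∨ y < 0 ∨ k < 0) : G f x y k d dp = 0 := by
  cases f <;> simp [G, h]

lemma G_base (f : Nat) (x y k d : Int) (dp : List (List (List (List Int))))
    (hg : ¬(x < 0 ∨ y < 0 ∨ k < 0)) (hb : x = 0 ∧ y = 0) : G f x y k d dp = 1 := by
  cases f <;> simp only [G] <;> rw [if_neg hg, if_pos hb]

lemma G_k0 (f : Nat) (x y k d : Int) (dp : List (List (List (List Int))))
    (hg : ¬(x < 0 ∨ y < 0 ∨ k < 0)) (hb : ¬(x = 0 ∧ y = 0)) (hk : k = 0) :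
    G f x y k d dp = (if d = 0 ∧ x = 0 then 1 else if d = 1 ∧ y = 0 then 1 else 0) := by
  cases f <;> simp only [G] <;> rw [if_neg hg, if_neg hb, if_pos hk]

lemma G_deep_succ (f : Nat) (x y k d : Int) (dp : List (List (List (List Int))))
    (hg : ¬(x < 0 ∨ y < 0 ∨ k < 0)) (hb : ¬(x = 0 ∧ y = 0)) (hk : ¬(k = 0)) :
    G (f + 1) x y k d dp =
      (match read4 dp x y k d with
       | none => 0
       | some v =>
         if v ≠ -1 then v
         else if d = 0 then
           G f x (y - 1) k d dp + G f (x - 1) y (k - 1) (|d - 1|) dp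
         else
           G f x (y - 1) (k - 1) (|d - 1|) dp + G f (x - 1) y k d dp) := by
  simp only [G]
  rw [if_neg hg, if_neg hb, if_neg hk]

lemma G_canon (dp : List (List (List (List Int)))) :
    ∀ (f : Nat) (x y k d : Int), x.toNat + y.toNat ≤ f →
      G f x y k d dp = G (x.toNat + y.toNat) x y k d dp := by
  intro f
  induction f using Nat.strong_induction_on with
  | _ f IH =>
    intro x y k d h
    by_cases hg : x < 0 ∨ y < 0 ∨ k < 0
    · rw [G_guard _ _ _ _ _ _ hg, G_guard _ _ _ _ _ _ hg]
    by_cases hb : x = 0 ∧ y = 0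
    · rw [G_base _ _ _ _ _ _ hg hb, G_base _ _ _ _ _ _ hg hb]
    by_cases hk : k = 0
    · rw [G_k0 _ _ _ _ _ _ hg hb hk, G_k0 _ _ _ _ _ _ hg hb hk]
    have hx0 : 0 ≤ x := by by_contra hc; exact hg (Or.inl (by omega))
    have hy0 : 0 ≤ y := by by_contra hc; exact hg (Or.inr (Or.inl (by omega)))
    have hμ : 1 ≤ x.toNat + y.toNat := by
      rcases not_and_or.mp hb with h0 | h0 <;> omega
    obtain ⟨μ', hμ'⟩ : ∃ μ', x.toNat + y.toNat = μ' + 1 :=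
      ⟨x.toNat + y.toNat - 1, by omega⟩
    obtain ⟨f', rfl⟩ : ∃ f', f = f' + 1 := ⟨f - 1, by omega⟩
    rw [hμ', G_deep_succ f' x y k d dp hg hb hk, G_deep_succ μ' x y k d dp hg hb hk]
    have hc1 : ∀ (k₁ d₁ : Int), G f' x (y - 1) k₁ d₁ dp = G μ' x (y - 1) k₁ d₁ dp := by
      intro k₁ d₁
      by_cases hyz : y = 0
      · rw [G_guard _ _ _ _ _ _ (Or.inr (Or.inl (by omega))),
            G_guard _ _ _ _ _ _ (Or.inr (Or.inl (by omega)))]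
      · have e1 := IH f' (by omega) x (y - 1) k₁ d₁ (by omega)
        have e2 := IH μ' (by omega) x (y - 1) k₁ d₁ (by omega)
        rw [e1, e2]
    have hc2 : ∀ (k₁ d₁ : Int), G f' (x - 1) y k₁ d₁ dp = G μ' (x - 1) y k₁ d₁ dp := by
      intro k₁ d₁
      by_cases hxz : x = 0
      · rw [G_guard _ _ _ _ _ _ (Or.inl (by omega)), G_guard _ _ _ _ _ _ (Or.inl (by omega))]
      · have e1 := IH f' (by omega) (x - 1) y k₁ d₁ (by omega)
        have e2 := IH μ' (by omega) (x - 1) y k₁ d₁ (by omega)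
        rw [e1, e2]
    cases hr : read4 dp x y k d with
    | none => rfl
    | some v =>
      dsimp only
      by_cases hv : v = -1
      · subst hv
        by_cases hdd : d = 0 <;> simp [hdd, hc1, hc2]
      · simp [hv]

lemma pyGet?_pySetD {α : Type} (xs : List α) (i j : Int) (v : α) (hi : 0 ≤ i) (hj : 0 ≤ j) :
    PySem.List.pyGet? (PySem.List.pySetD xs i v) j =
      if j = i ∧ (PySem.List.pyGet? xs i).isSome = true then some v
      else PySem.List.pyGet? xs j := by
  rw [PySem.List.pySetD_of_nonneg xs v hi, PySem.List.pyGet?_of_nonneg _ hj,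
      PySem.List.pyGet?_of_nonneg xs hj, PySem.List.pyGet?_of_nonneg xs hi]
  rcases hx : xs[i.toNat]? with _ | w
  · have hlen : xs.length ≤ i.toNat := by rwa [List.getElem?_eq_none_iff] at hx
    rw [List.set_eq_of_length_le hlen]
    simp
  · have hlen : i.toNat < xs.length := by
      by_contra hcon
      rw [List.getElem?_eq_none_iff.mpr (by omega)] at hx; cases hx
    rw [List.getElem?_set]
    by_cases hij : j = i
    · subst hij; simp [hlen]
    · have hne : ¬ i.toNat = j.toNat := by omega
      simp [hne, hij]

lemma read4_some {dp : List (List (List (List Int)))} {x y k d v : Int}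
    (h : read4 dp x y k d = some v) :
    ∃ r c e, PySem.List.pyGet? dp x = some r ∧ PySem.List.pyGet? r y = some c ∧
      PySem.List.pyGet? c k = some e ∧ PySem.List.pyGet? e d = some v := by
  unfold read4 at h
  cases hx : PySem.List.pyGet? dp x with
  | none => rw [hx] at h; simp at h
  | some r =>
    rw [hx] at h; simp only [Option.bind_some] at h
    cases hy : PySem.List.pyGet? r y with
    | none => rw [hy] at h; simp at h
    | some c =>
      rw [hy] at h; simp only [Option.bind_some] at h
      cases hk : PySem.List.pyGet? c k with
      | none => rw [hk] at h; simp at h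
      | some e => rw [hk] at h; simp only [Option.bind_some] at h; exact ⟨r, c, e, rfl, hy, hk, h⟩

lemma write4_eq {dp : List (List (List (List Int)))} {x y k d : Int} (v : Int)
    {r : List (List (List Int))} {c : List (List Int)} {e : List Int}
    (hx : PySem.List.pyGet? dp x = some r) (hy : PySem.List.pyGet? r y = some c)
    (hk : PySem.List.pyGet? c k = some e) :
    write4 dp x y k d v =
      PySem.List.pySetD dp x
        (PySem.List.pySetD r y
          (PySem.List.pySetD c k (PySem.List.pySetD e d v))) := by
  simp only [write4, hx, hy, hk]

lemma read4_write4 (dp : List (List (List (List Int)))) (x y k d v x' y' k' d' : Int)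
    (hx : 0 ≤ x) (hy : 0 ≤ y) (hk : 0 ≤ k) (hd : 0 ≤ d)
    (hx' : 0 ≤ x') (hy' : 0 ≤ y') (hk' : 0 ≤ k') (hd' : 0 ≤ d')
    {w : Int} (hs : read4 dp x y k d = some w) :
    read4 (write4 dp x y k d v) x' y' k' d' =
      if x' = x ∧ y' = y ∧ k' = k ∧ d' = d then some v else read4 dp x' y' k' d' := by
  obtain ⟨r, c, e, h1, h2, h3, h4⟩ := read4_some hs
  rw [write4_eq v h1 h2 h3]
  unfold read4
  rw [pyGet?_pySetD dp x x' _ hx hx']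
  by_cases e1 : x' = x
  · subst e1
    rw [if_pos ⟨rfl, by simp [h1]⟩, Option.bind_some,
        pyGet?_pySetD r y y' _ hy hy']
    by_cases e2 : y' = y
    · subst e2
      rw [if_pos ⟨rfl, by simp [h2]⟩, Option.bind_some,
          pyGet?_pySetD c k k' _ hk hk']
      by_cases e3 : k' = k
      · subst e3
        rw [if_pos ⟨rfl, by simp [h3]⟩, Option.bind_some,
            pyGet?_pySetD e d d' v hd hd']
        by_cases e4 : d' = d
        · subst e4
          rw [if_pos ⟨rfl, by simp [h4]⟩, if_pos ⟨rfl, rfl, rfl, rfl⟩]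
        · rw [if_neg (fun hc => e4 hc.1), if_neg (fun hc => e4 hc.2.2.2)]
          simp [h1, h2, h3]
      · rw [if_neg (fun hc => e3 hc.1), if_neg (fun hc => e3 hc.2.2.1)]
        simp [h1, h2]
    · rw [if_neg (fun hc => e2 hc.1), if_neg (fun hc => e2 hc.2.1)]
      simp [h1]
  · rw [if_neg (fun hc => e1 hc.1), if_neg (fun hc => e1 hc.1)]

lemma goA_guard (f : Nat) (x y k d : Int) (dp : List (List (List (List Int))))
    (h : x < 0 ∨ y < 0 ∨ k < 0) : goA f x y k d dp = (0, dp) := by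
  cases f <;> simp only [goA] <;> rw [if_pos h]

lemma Ghat_guard (dp : List (List (List (List Int)))) (x y k d : Int)
    (h : x < 0 ∨ y < 0 ∨ k < 0) : Ghat dp x y k d = 0 := G_guard _ _ _ _ _ _ h

lemma Ghat_base (dp : List (List (List (List Int)))) (x y k d : Int)
    (hg : ¬(x < 0 ∨ y < 0 ∨ k < 0)) (hb : x = 0 ∧ y = 0) : Ghat dp x y k d = 1 :=
  G_base _ _ _ _ _ _ hg hb

lemma Ghat_k0 (dp : List (List (List (List Int)))) (x y k d : Int)
    (hg : ¬(x < 0 ∨ y < 0 ∨ k < 0)) (hb : ¬(x = 0 ∧ y = 0)) (hk : k = 0) :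
    Ghat dp x y k d = (if d = 0 ∧ x = 0 then 1 else if d = 1 ∧ y = 0 then 1 else 0) :=
  G_k0 _ _ _ _ _ _ hg hb hk

lemma Ghat_mu_succ (x y k : Int) (hg : ¬(x < 0 ∨ y < 0 ∨ k < 0)) (hb : ¬(x = 0 ∧ y = 0)) :
    ∃ μ', x.toNat + y.toNat = μ' + 1 := by
  have hx0 : 0 ≤ x := by by_contra hc; exact hg (Or.inl (by omega))
  have hy0 : 0 ≤ y := by by_contra hc; exact hg (Or.inr (Or.inl (by omega)))
  have hμ : 1 ≤ x.toNat + y.toNat := by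
    rcases not_and_or.mp hb with h0 | h0 <;> omega
  exact ⟨x.toNat + y.toNat - 1, by omega⟩

lemma Ghat_none (dp : List (List (List (List Int)))) (x y k d : Int)
    (hg : ¬(x < 0 ∨ y < 0 ∨ k < 0)) (hb : ¬(x = 0 ∧ y = 0)) (hk : ¬(k = 0))
    (hr : read4 dp x y k d = none) : Ghat dp x y k d = 0 := by
  obtain ⟨μ', hμ'⟩ := Ghat_mu_succ x y k hg hb
  unfold Ghat
  rw [hμ', G_deep_succ μ' x y k d dp hg hb hk, hr]

lemma Ghat_cached (dp : List (List (List (List Int)))) (x y k d v : Int)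
    (hg : ¬(x < 0 ∨ y < 0 ∨ k < 0)) (hb : ¬(x = 0 ∧ y = 0)) (hk : ¬(k = 0))
    (hr : read4 dp x y k d = some v) (hv : ¬ v = -1) : Ghat dp x y k d = v := by
  obtain ⟨μ', hμ'⟩ := Ghat_mu_succ x y k hg hb
  unfold Ghat
  rw [hμ', G_deep_succ μ' x y k d dp hg hb hk, hr]
  simp [hv]

lemma Ghat_deep (dp : List (List (List (List Int)))) (x y k d : Int)
    (hg : ¬(x < 0 ∨ y < 0 ∨ k < 0)) (hb : ¬(x = 0 ∧ y = 0)) (hk : ¬(k = 0))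
    (hr : read4 dp x y k d = some (-1)) :
    Ghat dp x y k d =
      (if d = 0 then Ghat dp x (y - 1) k d + Ghat dp (x - 1) y (k - 1) (|d - 1|)
       else Ghat dp x (y - 1) (k - 1) (|d - 1|) + Ghat dp (x - 1) y k d) := by
  obtain ⟨μ', hμ'⟩ := Ghat_mu_succ x y k hg hb
  have hc1 : ∀ (k₁ d₁ : Int), G μ' x (y - 1) k₁ d₁ dp = Ghat dp x (y - 1) k₁ d₁ := by
    intro k₁ d₁; unfold Ghat
    by_cases hyz : y = 0
    · rw [G_guard _ _ _ _ _ _ (Or.inr (Or.inl (by omega))),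
          G_guard _ _ _ _ _ _ (Or.inr (Or.inl (by omega)))]
    · exact G_canon dp μ' x (y - 1) k₁ d₁ (by omega)
  have hc2 : ∀ (k₁ d₁ : Int), G μ' (x - 1) y k₁ d₁ dp = Ghat dp (x - 1) y k₁ d₁ := by
    intro k₁ d₁; unfold Ghat
    by_cases hxz : x = 0
    · rw [G_guard _ _ _ _ _ _ (Or.inl (by omega)), G_guard _ _ _ _ _ _ (Or.inl (by omega))]
    · exact G_canon dp μ' (x - 1) y k₁ d₁ (by omega)
  conv_lhs => rw [Ghat, hμ', G_deep_succ μ' x y k d dp hg hb hk, hr]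
  dsimp only
  by_cases hdd : d = 0 <;> simp [hdd, hc1, hc2]

-- the state invariant of A's memoized recursion: each dp cell in the box either still
-- holds its initial value or has been filled with the pure value Ghat of that cell
def InvA (dp0 dp : List (List (List (List Int)))) (X Y K : Int) : Prop :=
  ∀ i j l m : Int, 0 ≤ i → i ≤ X → 0 ≤ j → j ≤ Y → 0 ≤ l → l ≤ K → (m = 0 ∨ m = 1) →
    read4 dp i j l m = read4 dp0 i j l m ∨
    (read4 dp0 i j l m = some (-1) ∧ read4 dp i j l m = some (Ghat dp0 i j l m))

lemma goA_eq (dp0 : List (List (List (List Int)))) (X Y K : Int) :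
    ∀ (f : Nat) (x y k d : Int) (dp : List (List (List (List Int)))),
      InvA dp0 dp X Y K → x ≤ X → y ≤ Y → k ≤ K → (d = 0 ∨ d = 1) →
      x.toNat + y.toNat ≤ f →
      (goA f x y k d dp).1 = Ghat dp0 x y k d ∧ InvA dp0 (goA f x y k d dp).2 X Y K := by
  intro f
  induction f with
  | zero =>
    intro x y k d dp hI hX hY hK hd hf
    by_cases hg : x < 0 ∨ y < 0 ∨ k < 0
    · rw [goA_guard _ _ _ _ _ _ hg]; exact ⟨(Ghat_guard _ _ _ _ _ hg).symm, hI⟩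
    · have hb : x = 0 ∧ y = 0 := by
        have hx0 : 0 ≤ x := by by_contra hc; exact hg (Or.inl (by omega))
        have hy0 : 0 ≤ y := by by_contra hc; exact hg (Or.inr (Or.inl (by omega)))
        constructor <;> omega
      have hval : goA 0 x y k d dp = (1, dp) := by
        simp only [goA]; rw [if_neg hg, if_pos hb]
      rw [hval]; exact ⟨(Ghat_base _ _ _ _ _ hg hb).symm, hI⟩
  | succ f IH =>
    intro x y k d dp hI hX hY hK hd hf
    by_cases hg : x < 0 ∨ y < 0 ∨ k < 0
    · rw [goA_guard _ _ _ _ _ _ hg]; exact ⟨(Ghat_guard _ _ _ _ _ hg).symm, hI⟩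
    by_cases hb : x = 0 ∧ y = 0
    · have hval : goA (f + 1) x y k d dp = (1, dp) := by
        simp only [goA]; rw [if_neg hg, if_pos hb]
      rw [hval]; exact ⟨(Ghat_base _ _ _ _ _ hg hb).symm, hI⟩
    by_cases hk : k = 0
    · have hval : goA (f + 1) x y k d dp =
          (if d = 0 ∧ x = 0 then 1 else if d = 1 ∧ y = 0 then 1 else 0, dp) := by
        simp only [goA]; rw [if_neg hg, if_neg hb, if_pos hk]
      rw [hval]; exact ⟨(Ghat_k0 _ _ _ _ _ hg hb hk).symm, hI⟩
    -- recursive case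
    have hx0 : 0 ≤ x := by by_contra hc; exact hg (Or.inl (by omega))
    have hy0 : 0 ≤ y := by by_contra hc; exact hg (Or.inr (Or.inl (by omega)))
    have hk0 : 0 ≤ k := by by_contra hc; exact hg (Or.inr (Or.inr (by omega)))
    have hIc := hI x y k d hx0 hX hy0 hY hk0 hK hd
    simp only [goA]
    rw [if_neg hg, if_neg hb, if_neg hk]
    cases hr : read4 dp x y k d with
    | none =>
      have hr0 : read4 dp0 x y k d = none := by
        rcases hIc with h | ⟨h1, h2⟩
        · rw [← h, hr]
        · rw [hr] at h2; cases h2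
      exact ⟨(Ghat_none _ _ _ _ _ hg hb hk hr0).symm, hI⟩
    | some v =>
      dsimp only
      by_cases hv : v = -1
      case neg =>
        rw [if_pos hv]
        rcases hIc with h | ⟨h1, h2⟩
        · rw [hr] at h
          exact ⟨(Ghat_cached _ _ _ _ _ _ hg hb hk h.symm hv).symm, hI⟩
        · rw [hr] at h2
          exact ⟨(Option.some.injEq _ _ ▸ h2 : v = Ghat dp0 x y k d), hI⟩
      case pos =>
        subst hv
        rw [if_neg (by simp)]
        have hm0 : read4 dp0 x y k d = some (-1) := by
          rcases hIc with h | ⟨h1, _⟩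
          · rw [← h, hr]
          · exact h1
        rcases hd with hdd | hdd
        · subst hdd
          rw [if_pos rfl]
          have habs : |(0 : Int) - 1| = 1 := by decide
          rw [habs]
          dsimp only
          set p := goA f x (y - 1) k 0 dp with hp
          have hC1 : p.1 = Ghat dp0 x (y - 1) k 0 ∧ InvA dp0 p.2 X Y K := by
            by_cases hyz : y = 0
            · rw [hp, goA_guard _ _ _ _ _ _ (Or.inr (Or.inl (by omega)))]
              exact ⟨(Ghat_guard _ _ _ _ _ (Or.inr (Or.inl (by omega)))).symm, hI⟩
            · exact IH x (y - 1) k 0 dp hI hX (by omega) hK (Or.inl rfl) (by omega)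
          set q := goA f (x - 1) y (k - 1) 1 p.2 with hq
          have hC2 : q.1 = Ghat dp0 (x - 1) y (k - 1) 1 ∧ InvA dp0 q.2 X Y K := by
            by_cases hxz : x = 0
            · rw [hq, goA_guard _ _ _ _ _ _ (Or.inl (by omega))]
              exact ⟨(Ghat_guard _ _ _ _ _ (Or.inl (by omega))).symm, hC1.2⟩
            · exact IH (x - 1) y (k - 1) 1 p.2 hC1.2 (by omega) hY (by omega) (Or.inr rfl) (by omega)
          obtain ⟨w, hw0⟩ : ∃ w, read4 q.2 x y k 0 = some w := by
            rcases hC2.2 x y k 0 hx0 hX hy0 hY hk0 hK (Or.inl rfl) with h | ⟨_, h⟩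
            · exact ⟨-1, by rw [h, hm0]⟩
            · exact ⟨_, h⟩
          have hval : p.1 + q.1 = Ghat dp0 x y k 0 := by
            rw [hC1.1, hC2.1, Ghat_deep dp0 x y k 0 hg hb hk hm0, if_pos rfl, habs]
          constructor
          · rw [read4_write4 q.2 x y k 0 (p.1 + q.1) x y k 0 hx0 hy0 hk0 (le_refl 0)
                hx0 hy0 hk0 (le_refl 0) hw0, if_pos ⟨rfl, rfl, rfl, rfl⟩]
            simpa using hval
          · intro i j l m hi hiX hj hjY hl hlK hm
            have hmn : 0 ≤ m := by rcases hm with rfl | rfl <;> norm_num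
            rw [read4_write4 q.2 x y k 0 (p.1 + q.1) i j l m hx0 hy0 hk0 (le_refl 0)
                hi hj hl hmn hw0]
            by_cases hc : i = x ∧ j = y ∧ l = k ∧ m = 0
            · obtain ⟨rfl, rfl, rfl, rfl⟩ := hc
              rw [if_pos ⟨rfl, rfl, rfl, rfl⟩]
              exact Or.inr ⟨hm0, by rw [hval]⟩
            · rw [if_neg hc]
              exact hC2.2 i j l m hi hiX hj hjY hl hlK hm
        · subst hdd
          rw [if_neg (by norm_num)]
          have habs : |(1 : Int) - 1| = 0 := by decide
          rw [habs]
          dsimp only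
          set p := goA f x (y - 1) (k - 1) 0 dp with hp
          have hC1 : p.1 = Ghat dp0 x (y - 1) (k - 1) 0 ∧ InvA dp0 p.2 X Y K := by
            by_cases hyz : y = 0
            · rw [hp, goA_guard _ _ _ _ _ _ (Or.inr (Or.inl (by omega)))]
              exact ⟨(Ghat_guard _ _ _ _ _ (Or.inr (Or.inl (by omega)))).symm, hI⟩
            · exact IH x (y - 1) (k - 1) 0 dp hI hX (by omega) (by omega) (Or.inl rfl) (by omega)
          set q := goA f (x - 1) y k 1 p.2 with hq
          have hC2 : q.1 = Ghat dp0 (x - 1) y k 1 ∧ InvA dp0 q.2 X Y K := by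
            by_cases hxz : x = 0
            · rw [hq, goA_guard _ _ _ _ _ _ (Or.inl (by omega))]
              exact ⟨(Ghat_guard _ _ _ _ _ (Or.inl (by omega))).symm, hC1.2⟩
            · exact IH (x - 1) y k 1 p.2 hC1.2 (by omega) hY hK (Or.inr rfl) (by omega)
          obtain ⟨w, hw0⟩ : ∃ w, read4 q.2 x y k 1 = some w := by
            rcases hC2.2 x y k 1 hx0 hX hy0 hY hk0 hK (Or.inr rfl) with h | ⟨_, h⟩
            · exact ⟨-1, by rw [h, hm0]⟩
            · exact ⟨_, h⟩
          have hval : p.1 + q.1 = Ghat dp0 x y k 1 := by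
            rw [hC1.1, hC2.1, Ghat_deep dp0 x y k 1 hg hb hk hm0, if_neg (by norm_num), habs]
          constructor
          · rw [read4_write4 q.2 x y k 1 (p.1 + q.1) x y k 1 hx0 hy0 hk0 (by norm_num)
                hx0 hy0 hk0 (by norm_num) hw0, if_pos ⟨rfl, rfl, rfl, rfl⟩]
            simpa using hval
          · intro i j l m hi hiX hj hjY hl hlK hm
            have hmn : 0 ≤ m := by rcases hm with rfl | rfl <;> norm_num
            rw [read4_write4 q.2 x y k 1 (p.1 + q.1) i j l m hx0 hy0 hk0 (by norm_num)
                hi hj hl hmn hw0]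
            by_cases hc : i = x ∧ j = y ∧ l = k ∧ m = 1
            · obtain ⟨rfl, rfl, rfl, rfl⟩ := hc
              rw [if_pos ⟨rfl, rfl, rfl, rfl⟩]
              exact Or.inr ⟨hm0, by rw [hval]⟩
            · rw [if_neg hc]
              exact hC2.2 i j l m hi hiX hj hjY hl hlK hm

-- ---------- B side: the bottom-up table computes Ghat cell by cell ----------

def stepB (dp : List (List (List (List Int)))) (t : PySem.Dict (Int × Int × Int × Int) Int)
    (c : Int × Int × Int × Int) : PySem.Dict (Int × Int × Int × Int) Int :=
  t.insert c (cellB dp t c.1 c.2.1 c.2.2.1 c.2.2.2)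

def blockFold (dp : List (List (List (List Int)))) (i j B : Int)
    (t : PySem.Dict (Int × Int × Int × Int) Int) : PySem.Dict (Int × Int × Int × Int) Int :=
  ((PySem.List.pyRange 0 B 1).flatMap fun l =>
    [((i, j, l, 0) : Int × Int × Int × Int), (i, j, l, 1)]).foldl (stepB dp) t

def rowFold (dp : List (List (List (List Int)))) (i BY BK : Int)
    (t : PySem.Dict (Int × Int × Int × Int) Int) : PySem.Dict (Int × Int × Int × Int) Int :=
  ((PySem.List.pyRange 0 BY 1).flatMap fun j =>
    (PySem.List.pyRange 0 BK 1).flatMap fun l =>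
      [((i, j, l, 0) : Int × Int × Int × Int), (i, j, l, 1)]).foldl (stepB dp) t

def topFold (dp : List (List (List (List Int)))) (BX BY BK : Int)
    (t : PySem.Dict (Int × Int × Int × Int) Int) : PySem.Dict (Int × Int × Int × Int) Int :=
  ((PySem.List.pyRange 0 BX 1).flatMap fun i =>
    (PySem.List.pyRange 0 BY 1).flatMap fun j =>
      (PySem.List.pyRange 0 BK 1).flatMap fun l =>
        [((i, j, l, 0) : Int × Int × Int × Int), (i, j, l, 1)]).foldl (stepB dp) t

lemma get?_stepB (dp : List (List (List (List Int)))) (t : PySem.Dict (Int × Int × Int × Int) Int)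
    (c c' : Int × Int × Int × Int) :
    (stepB dp t c).get? c' =
      if c' = c then some (cellB dp t c.1 c.2.1 c.2.2.1 c.2.2.2) else t.get? c' :=
  PySem.Dict.get?_insert _ _ _ _

lemma cell_ne_fst {a b : Int × Int × Int × Int} (h : a.1 ≠ b.1) : a ≠ b :=
  fun he => h (congrArg Prod.fst he)
lemma cell_ne_snd {a b : Int × Int × Int × Int} (h : a.2.1 ≠ b.2.1) : a ≠ b :=
  fun he => h (congrArg (fun p => p.2.1) he)
lemma cell_ne_trd {a b : Int × Int × Int × Int} (h : a.2.2.1 ≠ b.2.2.1) : a ≠ b :=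
  fun he => h (congrArg (fun p => p.2.2.1) he)
lemma cell_ne_fth {a b : Int × Int × Int × Int} (h : a.2.2.2 ≠ b.2.2.2) : a ≠ b :=
  fun he => h (congrArg (fun p => p.2.2.2) he)

lemma cellB_correct (dp : List (List (List (List Int))))
    (t : PySem.Dict (Int × Int × Int × Int) Int) (i j l m : Int)
    (hi : 0 ≤ i) (hj : 0 ≤ j) (hl : 0 ≤ l) (hm : m = 0 ∨ m = 1)
    (h1 : 0 < j → t.get? (i, j - 1, l, 0) = some (Ghat dp i (j - 1) l 0))
    (h2 : 0 < i → 1 ≤ l → t.get? (i - 1, j, l - 1, 1) = some (Ghat dp (i - 1) j (l - 1) 1))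
    (h3 : 0 < j → 1 ≤ l → t.get? (i, j - 1, l - 1, 0) = some (Ghat dp i (j - 1) (l - 1) 0))
    (h4 : 0 < i → t.get? (i - 1, j, l, 1) = some (Ghat dp (i - 1) j l 1)) :
    cellB dp t i j l m = Ghat dp i j l m := by
  have hg : ¬(i < 0 ∨ j < 0 ∨ l < 0) := by intro hcon; rcases hcon with h | h | h <;> omega
  unfold cellB
  by_cases hb : i = 0 ∧ j = 0
  · rw [if_pos hb, Ghat_base dp i j l m hg hb]
  rw [if_neg hb]
  by_cases hk : l = 0
  · rw [if_pos hk, Ghat_k0 dp i j l m hg hb hk]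
    rcases hm with rfl | rfl <;> split_ifs <;> omega
  rw [if_neg hk]
  cases hr : read4 dp i j l m with
  | none => rw [Ghat_none dp i j l m hg hb hk hr]
  | some v =>
    dsimp only
    by_cases hv : v = -1
    case neg => rw [if_pos hv, Ghat_cached dp i j l m v hg hb hk hr hv]
    case pos =>
      subst hv
      rw [if_neg (by simp), Ghat_deep dp i j l m hg hb hk hr]
      have e1 : (if 0 < j then ((t.get? (i, j - 1, l, 0)).getD 0) else 0) =
          Ghat dp i (j - 1) l 0 := by
        by_cases hjz : 0 < j
        · rw [if_pos hjz, h1 hjz]; rfl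
        · rw [if_neg hjz, Ghat_guard dp i (j - 1) l 0 (Or.inr (Or.inl (by omega)))]
      have e2 : (if 0 < i then ((t.get? (i - 1, j, l - 1, 1)).getD 0) else 0) =
          Ghat dp (i - 1) j (l - 1) 1 := by
        by_cases hiz : 0 < i
        · rw [if_pos hiz, h2 hiz (by omega)]; rfl
        · rw [if_neg hiz, Ghat_guard dp (i - 1) j (l - 1) 1 (Or.inl (by omega))]
      have e3 : (if 0 < j then ((t.get? (i, j - 1, l - 1, 0)).getD 0) else 0) =
          Ghat dp i (j - 1) (l - 1) 0 := by
        by_cases hjz : 0 < j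
        · rw [if_pos hjz, h3 hjz (by omega)]; rfl
        · rw [if_neg hjz, Ghat_guard dp i (j - 1) (l - 1) 0 (Or.inr (Or.inl (by omega)))]
      have e4 : (if 0 < i then ((t.get? (i - 1, j, l, 1)).getD 0) else 0) =
          Ghat dp (i - 1) j l 1 := by
        by_cases hiz : 0 < i
        · rw [if_pos hiz, h4 hiz]; rfl
        · rw [if_neg hiz, Ghat_guard dp (i - 1) j l 1 (Or.inl (by omega))]
      rcases hm with rfl | rfl
      · rw [if_pos (show ((0 : Int) = 0) from rfl), if_pos (show ((0 : Int) = 0) from rfl),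
            show |(0 : Int) - 1| = (1 : Int) from by decide, e1, e2]
      · rw [if_neg (show ¬((1 : Int) = 0) from by norm_num),
            if_neg (show ¬((1 : Int) = 0) from by norm_num),
            show |(1 : Int) - 1| = (0 : Int) from by decide, e3, e4]

lemma block_fold (dp : List (List (List (List Int)))) (K i j : Int) (hi : 0 ≤ i) (hj : 0 ≤ j) :
    ∀ (B : Nat), (B : Int) ≤ K + 1 →
      ∀ t : PySem.Dict (Int × Int × Int × Int) Int,
      (∀ l' m' : Int, 0 ≤ l' → l' ≤ K → (m' = 0 ∨ m' = 1) → 0 < j →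
        t.get? (i, j - 1, l', m') = some (Ghat dp i (j - 1) l' m')) →
      (∀ l' m' : Int, 0 ≤ l' → l' ≤ K → (m' = 0 ∨ m' = 1) → 0 < i →
        t.get? (i - 1, j, l', m') = some (Ghat dp (i - 1) j l' m')) →
      (∀ l m : Int, 0 ≤ l → l < (B : Int) → (m = 0 ∨ m = 1) →
        (blockFold dp i j (B : Int) t).get? (i, j, l, m) = some (Ghat dp i j l m)) ∧
      (∀ c : Int × Int × Int × Int, ¬(c.1 = i ∧ c.2.1 = j) →
        (blockFold dp i j (B : Int) t).get? c = t.get? c) := by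
  intro B
  induction B with
  | zero =>
    intro _ t _ _
    constructor
    · intro l m hl hlB _; omega
    · intro c _
      simp [blockFold, PySem.List.pyRange_one_eq_nil (by norm_num : (0 : Int) ≤ 0)]
  | succ B IH =>
    intro hB t h1 h2
    obtain ⟨P1, P2⟩ := IH (by omega) t h1 h2
    set tB := blockFold dp i j (B : Int) t with htB
    set t1 := stepB dp tB ((i, j, (B : Int), 0) : Int × Int × Int × Int) with ht1
    have hcast : ((B + 1 : Nat) : Int) = (B : Int) + 1 := by push_cast; ring
    have hsplit : PySem.List.pyRange 0 ((B : Int) + 1) 1 =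
        PySem.List.pyRange 0 (B : Int) 1 ++ [(B : Int)] :=
      PySem.List.pyRange_one_succ_right (Int.natCast_nonneg B)
    have hfold : blockFold dp i j ((B + 1 : Nat) : Int) t =
        stepB dp t1 ((i, j, (B : Int), 1) : Int × Int × Int × Int) := by
      rw [hcast]
      unfold blockFold
      rw [hsplit, List.flatMap_append, List.foldl_append]
      simp only [List.flatMap_cons, List.flatMap_nil, List.append_nil, List.foldl_cons,
        List.foldl_nil]
      rfl
    have h1B : ∀ l' m' : Int, 0 ≤ l' → l' ≤ K → (m' = 0 ∨ m' = 1) → 0 < j →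
        tB.get? (i, j - 1, l', m') = some (Ghat dp i (j - 1) l' m') := by
      intro l' m' a b c e
      rw [P2 (i, j - 1, l', m') (by dsimp only; omega)]
      exact h1 l' m' a b c e
    have h2B : ∀ l' m' : Int, 0 ≤ l' → l' ≤ K → (m' = 0 ∨ m' = 1) → 0 < i →
        tB.get? (i - 1, j, l', m') = some (Ghat dp (i - 1) j l' m') := by
      intro l' m' a b c e
      rw [P2 (i - 1, j, l', m') (by dsimp only; omega)]
      exact h2 l' m' a b c e
    have hv0 : cellB dp tB i j (B : Int) 0 = Ghat dp i j (B : Int) 0 :=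
      cellB_correct dp tB i j (B : Int) 0 hi hj (Int.natCast_nonneg B) (Or.inl rfl)
        (fun hjz => h1B (B : Int) 0 (Int.natCast_nonneg B) (by omega) (Or.inl rfl) hjz)
        (fun hiz hl1 => h2B ((B : Int) - 1) 1 (by omega) (by omega) (Or.inr rfl) hiz)
        (fun hjz hl1 => h1B ((B : Int) - 1) 0 (by omega) (by omega) (Or.inl rfl) hjz)
        (fun hiz => h2B (B : Int) 1 (Int.natCast_nonneg B) (by omega) (Or.inr rfl) hiz)
    have t1get : ∀ c' : Int × Int × Int × Int,
        c' ≠ ((i, j, (B : Int), 0) : Int × Int × Int × Int) → t1.get? c' = tB.get? c' := by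
      intro c' hne; rw [ht1, get?_stepB, if_neg hne]
    have h1B1 : ∀ l' m' : Int, 0 ≤ l' → l' ≤ K → (m' = 0 ∨ m' = 1) → 0 < j →
        t1.get? (i, j - 1, l', m') = some (Ghat dp i (j - 1) l' m') := by
      intro l' m' a b c e
      rw [t1get _ (cell_ne_snd (by dsimp only; omega))]
      exact h1B l' m' a b c e
    have h2B1 : ∀ l' m' : Int, 0 ≤ l' → l' ≤ K → (m' = 0 ∨ m' = 1) → 0 < i →
        t1.get? (i - 1, j, l', m') = some (Ghat dp (i - 1) j l' m') := by
      intro l' m' a b c e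
      rw [t1get _ (cell_ne_fst (by dsimp only; omega))]
      exact h2B l' m' a b c e
    have hv1 : cellB dp t1 i j (B : Int) 1 = Ghat dp i j (B : Int) 1 :=
      cellB_correct dp t1 i j (B : Int) 1 hi hj (Int.natCast_nonneg B) (Or.inr rfl)
        (fun hjz => h1B1 (B : Int) 0 (Int.natCast_nonneg B) (by omega) (Or.inl rfl) hjz)
        (fun hiz hl1 => h2B1 ((B : Int) - 1) 1 (by omega) (by omega) (Or.inr rfl) hiz)
        (fun hjz hl1 => h1B1 ((B : Int) - 1) 0 (by omega) (by omega) (Or.inl rfl) hjz)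
        (fun hiz => h2B1 (B : Int) 1 (Int.natCast_nonneg B) (by omega) (Or.inr rfl) hiz)
    constructor
    · intro l m hl hlB hm
      rw [hfold]
      by_cases hlB' : l = (B : Int)
      · subst hlB'
        rcases hm with rfl | rfl
        · rw [get?_stepB, if_neg (cell_ne_fth (by dsimp only; omega)), ht1, get?_stepB,
              if_pos rfl]
          dsimp only
          rw [hv0]
        · rw [get?_stepB, if_pos rfl]
          dsimp only
          rw [hv1]
      · have hne1 : ((i, j, l, m) : Int × Int × Int × Int) ≠ (i, j, (B : Int), 1) :=
          cell_ne_trd (by dsimp only; omega)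
        have hne0 : ((i, j, l, m) : Int × Int × Int × Int) ≠ (i, j, (B : Int), 0) :=
          cell_ne_trd (by dsimp only; omega)
        rw [get?_stepB, if_neg hne1, t1get _ hne0]
        exact P1 l m hl (by omega) hm
    · intro c hc
      rw [hfold]
      have hne1 : c ≠ ((i, j, (B : Int), 1) : Int × Int × Int × Int) := by
        intro he; exact hc (by rw [he]; exact ⟨rfl, rfl⟩)
      have hne0 : c ≠ ((i, j, (B : Int), 0) : Int × Int × Int × Int) := by
        intro he; exact hc (by rw [he]; exact ⟨rfl, rfl⟩)
      rw [get?_stepB, if_neg hne1, t1get c hne0]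
      exact P2 c hc

lemma row_fold (dp : List (List (List (List Int)))) (K Y i : Int) (hi : 0 ≤ i) (hK : 0 ≤ K) :
    ∀ (B : Nat), (B : Int) ≤ Y + 1 →
      ∀ t : PySem.Dict (Int × Int × Int × Int) Int,
      (∀ j' l' m' : Int, 0 ≤ j' → j' ≤ Y → 0 ≤ l' → l' ≤ K → (m' = 0 ∨ m' = 1) → 0 < i →
        t.get? (i - 1, j', l', m') = some (Ghat dp (i - 1) j' l' m')) →
      (∀ j l m : Int, 0 ≤ j → j < (B : Int) → 0 ≤ l → l ≤ K → (m = 0 ∨ m = 1) →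
        (rowFold dp i (B : Int) (K + 1) t).get? (i, j, l, m) = some (Ghat dp i j l m)) ∧
      (∀ c : Int × Int × Int × Int, c.1 ≠ i →
        (rowFold dp i (B : Int) (K + 1) t).get? c = t.get? c) := by
  intro B
  induction B with
  | zero =>
    intro _ t _
    constructor
    · intro j l m hjl hjB _ _ _; omega
    · intro c _
      simp [rowFold, PySem.List.pyRange_one_eq_nil (by norm_num : (0 : Int) ≤ 0)]
  | succ B IH =>
    intro hB t h2
    obtain ⟨P1, P2⟩ := IH (by omega) t h2
    set tB := rowFold dp i (B : Int) (K + 1) t with htB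
    have hcast : ((B + 1 : Nat) : Int) = (B : Int) + 1 := by push_cast; ring
    have hsplit : PySem.List.pyRange 0 ((B : Int) + 1) 1 =
        PySem.List.pyRange 0 (B : Int) 1 ++ [(B : Int)] :=
      PySem.List.pyRange_one_succ_right (Int.natCast_nonneg B)
    have hfold : rowFold dp i ((B + 1 : Nat) : Int) (K + 1) t =
        blockFold dp i (B : Int) (K + 1) tB := by
      rw [hcast]
      unfold rowFold blockFold
      rw [hsplit, List.flatMap_append, List.foldl_append]
      simp only [List.flatMap_cons, List.flatMap_nil, List.append_nil]
      rfl
    have h1blk : ∀ l' m' : Int, 0 ≤ l' → l' ≤ K → (m' = 0 ∨ m' = 1) → 0 < (B : Int) →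
        tB.get? (i, (B : Int) - 1, l', m') = some (Ghat dp i ((B : Int) - 1) l' m') :=
      fun l' m' a b c e => P1 ((B : Int) - 1) l' m' (by omega) (by omega) a b c
    have h2blk : ∀ l' m' : Int, 0 ≤ l' → l' ≤ K → (m' = 0 ∨ m' = 1) → 0 < i →
        tB.get? (i - 1, (B : Int), l', m') = some (Ghat dp (i - 1) (B : Int) l' m') := by
      intro l' m' a b c e
      rw [P2 (i - 1, (B : Int), l', m') (by dsimp only; omega)]
      exact h2 (B : Int) l' m' (Int.natCast_nonneg B) (by omega) a b c e
    have hKcast : (((K + 1).toNat : Nat) : Int) = K + 1 := Int.toNat_of_nonneg (by omega)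
    obtain ⟨Q1, Q2⟩ := block_fold dp K i (B : Int) hi (Int.natCast_nonneg B) (K + 1).toNat
      (le_of_eq hKcast) tB h1blk h2blk
    rw [hKcast] at Q1 Q2
    constructor
    · intro j l m hj hjB hl hlK hm
      rw [hfold]
      by_cases hjB' : j = (B : Int)
      · subst hjB'
        exact Q1 l m hl (by omega) hm
      · rw [Q2 (i, j, l, m) (by dsimp only; omega)]
        exact P1 j l m hj (by omega) hl hlK hm
    · intro c hc
      rw [hfold, Q2 c (fun hcc => hc hcc.1)]
      exact P2 c hc

lemma top_fold (dp : List (List (List (List Int)))) (Y K : Int) (hY : 0 ≤ Y) (hK : 0 ≤ K) :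
    ∀ (B : Nat) (i j l m : Int), 0 ≤ i → i < (B : Int) → 0 ≤ j → j ≤ Y → 0 ≤ l → l ≤ K →
      (m = 0 ∨ m = 1) →
      (topFold dp (B : Int) (Y + 1) (K + 1) PySem.Dict.empty).get? (i, j, l, m) =
        some (Ghat dp i j l m) := by
  intro B
  induction B with
  | zero => intro i j l m h0 h1 _ _ _ _ _; omega
  | succ B IH =>
    have hcast : ((B + 1 : Nat) : Int) = (B : Int) + 1 := by push_cast; ring
    have hsplit : PySem.List.pyRange 0 ((B : Int) + 1) 1 =
        PySem.List.pyRange 0 (B : Int) 1 ++ [(B : Int)] :=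
      PySem.List.pyRange_one_succ_right (Int.natCast_nonneg B)
    set tB := topFold dp (B : Int) (Y + 1) (K + 1) PySem.Dict.empty with htB
    have hfold : topFold dp ((B + 1 : Nat) : Int) (Y + 1) (K + 1) PySem.Dict.empty =
        rowFold dp (B : Int) (Y + 1) (K + 1) tB := by
      rw [hcast]
      unfold topFold rowFold
      rw [hsplit, List.flatMap_append, List.foldl_append]
      simp only [List.flatMap_cons, List.flatMap_nil, List.append_nil]
      rfl
    have h2row : ∀ j' l' m' : Int, 0 ≤ j' → j' ≤ Y → 0 ≤ l' → l' ≤ K → (m' = 0 ∨ m' = 1) →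
        0 < (B : Int) →
        tB.get? ((B : Int) - 1, j', l', m') = some (Ghat dp ((B : Int) - 1) j' l' m') :=
      fun j' l' m' a b c e f g => IH ((B : Int) - 1) j' l' m' (by omega) (by omega) a b c e f
    have hYcast : (((Y + 1).toNat : Nat) : Int) = Y + 1 := Int.toNat_of_nonneg (by omega)
    obtain ⟨R1, R2⟩ := row_fold dp K Y (B : Int) (Int.natCast_nonneg B) hK (Y + 1).toNat
      (le_of_eq hYcast) tB h2row
    rw [hYcast] at R1 R2
    intro i j l m hi hiB hj hjY hl hlK hm
    rw [hfold]
    by_cases hiB' : i = (B : Int)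
    · subst hiB'
      exact R1 j l m hj (by omega) hl hlK hm
    · rw [R2 (i, j, l, m) (by dsimp only; omega)]
      exact IH i j l m hi (by omega) hj hjY hl hlK hm

-- ===== VERDICT (by name: the statement is the Claim_ definition above) =====
theorem countPathsUtil_spec : Claim_equal_countPathsUtil := by
  intro x y k d dp hDom hPre
  unfold Spec_countPathsUtil
  by_cases hg : x < 0 ∨ y < 0 ∨ k < 0
  · unfold countPathsUtil countPathsUtil_alt
    rw [goA_guard _ _ _ _ _ _ hg, if_pos hg]
  by_cases hb : x = 0 ∧ y = 0
  · unfold countPathsUtil countPathsUtil_alt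
    have hval : goA (x.toNat + y.toNat + 1) x y k d dp = (1, dp) := by
      simp only [goA]; rw [if_neg hg, if_pos hb]
    rw [hval, if_neg hg, if_pos hb]
  by_cases hk : k = 0
  · unfold countPathsUtil countPathsUtil_alt
    have hval : goA (x.toNat + y.toNat + 1) x y k d dp =
        (if d = 0 ∧ x = 0 then 1 else if d = 1 ∧ y = 0 then 1 else 0, dp) := by
      simp only [goA]; rw [if_neg hg, if_neg hb, if_pos hk]
    rw [hval, if_neg hg, if_neg hb, if_pos hk]
    dsimp only
    split_ifs <;> tauto
  -- the recursive case: A's memoized recursion and B's table both compute Ghat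
  have hd : d = 0 ∨ d = 1 := by
    rcases hPre with hE | ⟨hd', _⟩
    · exfalso
      rcases hE with h | h | h | h | h
      exacts [hg (Or.inl h), hg (Or.inr (Or.inl h)), hg (Or.inr (Or.inr h)), hb h, hk h]
    · exact hd'
  have hx0 : 0 ≤ x := by by_contra hc; exact hg (Or.inl (by omega))
  have hy0 : 0 ≤ y := by by_contra hc; exact hg (Or.inr (Or.inl (by omega)))
  have hk0 : 0 ≤ k := by by_contra hc; exact hg (Or.inr (Or.inr (by omega)))
  have hA : countPathsUtil x y k d dp = Ghat dp x y k d := by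
    unfold countPathsUtil
    have hInv : InvA dp dp x y k := fun i j l m _ _ _ _ _ _ _ => Or.inl rfl
    exact (goA_eq dp x y k (x.toNat + y.toNat + 1) x y k d dp hInv le_rfl le_rfl le_rfl hd
      (by omega)).1
  have hB : countPathsUtil_alt x y k d dp = Ghat dp x y k d := by
    unfold countPathsUtil_alt
    rw [if_neg hg, if_neg hb, if_neg hk]
    show ((topFold dp (x + 1) (y + 1) (k + 1) PySem.Dict.empty).get? (x, y, k, d)).getD 0 =
      Ghat dp x y k d
    have hXcast : (((x + 1).toNat : Nat) : Int) = x + 1 := Int.toNat_of_nonneg (by omega)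
    have hkey := top_fold dp y k hy0 hk0 (x + 1).toNat x y k d hx0 (by omega) hy0 le_rfl
      hk0 le_rfl hd
    rw [hXcast] at hkey
    rw [hkey]
    rfl
  rw [hA, hB]
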